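-- pv_equiv track=rewrite | github.com/ownport/jira-reports | jirareports/dt.py | roundto_range
-- ===== SOURCE A (Python) =====
-- def roundto_range(dt_start, dt_end, roundto):
--     ''' return rounded epoch time to 'roundto' value and format to the next formats:
--     '''
--     result = list()
--     dt_point = dt_start - dt_start % roundto
--     result.append(dt_point)
--     while dt_point + roundto <= dt_end:
--         dt_point += roundto
--         result.append(dt_point)
--     return result
-- ===== SOURCE B (Python) =====
-- def roundto_range(dt_start, dt_end, roundto):
--     start = dt_start - dt_start % roundto
--     p = dt_end - dt_end % roundto
--     result = []
--     while p > start: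
--         result.append(p)
--         p -= roundto
--     result.append(start)
--     result.reverse()
--     return result
-- ===== Notes on version B (the rewrite author's own statement) =====
-- stated objective: alternative
-- what changed: B builds the list back-to-front: it rounds dt_end down, descends from that endpoint by roundto until it passes the rounded start, then reverses the collected points, instead of A's ascending accumulate-and-append while-loop from the rounded start.
import Mathlib
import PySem

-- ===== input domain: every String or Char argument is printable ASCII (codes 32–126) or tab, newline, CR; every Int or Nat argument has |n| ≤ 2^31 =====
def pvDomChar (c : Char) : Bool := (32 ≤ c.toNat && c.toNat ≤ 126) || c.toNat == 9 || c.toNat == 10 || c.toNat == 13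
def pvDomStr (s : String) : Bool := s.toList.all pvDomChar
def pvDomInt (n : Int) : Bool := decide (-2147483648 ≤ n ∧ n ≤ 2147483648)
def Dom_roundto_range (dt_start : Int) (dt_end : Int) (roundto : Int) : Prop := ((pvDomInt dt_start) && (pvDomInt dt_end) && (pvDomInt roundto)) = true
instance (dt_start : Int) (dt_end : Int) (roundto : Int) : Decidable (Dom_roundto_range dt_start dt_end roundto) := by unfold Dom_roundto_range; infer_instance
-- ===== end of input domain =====

-- B builds the list back-to-front: it descends from the rounded END by roundto down to the rounded start, then reverses; A ascends from the rounded start with an accumulating while-loop.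


-- ===== PORT A =====
-- the while-loop of A; fuel is only a totality guard (large enough whenever roundto ≥ 1)
def rtLoop (dt_end roundto : Int) : Nat → Int → List Int
  | 0, _ => []
  | fuel + 1, dt_point =>
    if dt_point + roundto ≤ dt_end then
      (dt_point + roundto) :: rtLoop dt_end roundto fuel (dt_point + roundto)
    else []

def roundto_range (dt_start : Int) (dt_end : Int) (roundto : Int) : List Int :=
  let dt_point := dt_start - PySem.Int.mod dt_start roundto
  dt_point :: rtLoop dt_end roundto ((dt_end - dt_point).toNat + 1) dt_point

-- ===== PORT B =====
-- B's descending while-loop: p runs from the rounded end down to start, appending as it goes; fuel is only a totality guard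
def rtDown (start roundto : Int) : Nat → Int → List Int → List Int
  | 0, _, acc => acc
  | fuel + 1, p, acc =>
    if start < p then rtDown start roundto fuel (p - roundto) (acc ++ [p]) else acc

def roundto_range_alt (dt_start : Int) (dt_end : Int) (roundto : Int) : List Int :=
  let start := dt_start - PySem.Int.mod dt_start roundto
  let p := dt_end - PySem.Int.mod dt_end roundto
  let result := rtDown start roundto ((p - start).toNat + 1) p []
  (result ++ [start]).reverse

-- ===== PRECONDITION & SPEC =====
-- Pre_ excludes only roundto = 0 (ZeroDivisionError in both programs) and the negative-roundto
-- inputs on which A's while-loop never terminates (B's loop diverges there too); every input on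
-- which A returns a value satisfies Pre_.
def Pre_roundto_range (dt_start : Int) (dt_end : Int) (roundto : Int) : Prop :=
  0 < roundto ∨ (roundto < 0 ∧ dt_end < dt_start - PySem.Int.mod dt_start roundto + roundto)
instance (dt_start : Int) (dt_end : Int) (roundto : Int) : Decidable (Pre_roundto_range dt_start dt_end roundto) := by unfold Pre_roundto_range; infer_instance
def pvWitness_roundto_range : Int × Int × Int := (7, 25, 5)

def Spec_roundto_range (dt_start : Int) (dt_end : Int) (roundto : Int) (out : List Int) : Prop := out = roundto_range_alt dt_start dt_end roundto
instance (dt_start : Int) (dt_end : Int) (roundto : Int) (out : List Int) : Decidable (Spec_roundto_range dt_start dt_end roundto out) := by unfold Spec_roundto_range; infer_instance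

-- ===== CLAIM (what is proved, stated in full; the proofs are below) =====
def Claim_equal_roundto_range : Prop := ∀ (dt_start : Int) (dt_end : Int) (roundto : Int), Dom_roundto_range dt_start dt_end roundto → Pre_roundto_range dt_start dt_end roundto → Spec_roundto_range dt_start dt_end roundto (roundto_range dt_start dt_end roundto)

-- ===== LEMMAS AND PROOFS =====

-- A's loop, given enough fuel, yields the ascending arithmetic progression of length (dt_end - p) // r (clamped at 0)
lemma rtLoop_eq (e r : Int) (hr : 0 < r) :
    ∀ (fuel : Nat) (p : Int), (e - p).toNat < fuel →
      rtLoop e r fuel p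
        = (List.range (PySem.Int.floordiv (e - p) r).toNat).map
            (fun k : Nat => p + ((k : Int) + 1) * r) := by
  intro fuel
  induction fuel with
  | zero => intro p h; omega
  | succ fuel ih =>
    intro p h
    rw [rtLoop]
    by_cases hc : p + r ≤ e
    · have h1 : (1 : Int) ≤ PySem.Int.floordiv (e - p) r := by
        rw [PySem.Int.le_floordiv_iff_mul_le hr]; omega
      have hq := (PySem.Int.floordiv_eq_iff_of_pos (a := e - p) hr).mp rfl
      have hstep : PySem.Int.floordiv (e - (p + r)) r = PySem.Int.floordiv (e - p) r - 1 := by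
        rw [PySem.Int.floordiv_eq_iff_of_pos hr]
        constructor <;> nlinarith [hq.1, hq.2]
      have hfuel : (e - (p + r)).toNat < fuel := by omega
      rw [if_pos hc, ih (p + r) hfuel, hstep]
      have hk : (PySem.Int.floordiv (e - p) r).toNat
          = (PySem.Int.floordiv (e - p) r - 1).toNat + 1 := by omega
      rw [hk, List.range_succ_eq_map, List.map_cons, List.map_map]
      refine List.cons_eq_cons.mpr ⟨by ring, ?_⟩
      apply List.map_congr_left; intro k _; simp [Function.comp]; ring
    · have h0 : PySem.Int.floordiv (e - p) r < 1 := by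
        rw [PySem.Int.floordiv_lt_iff_lt_mul hr]; omega
      have h0' : (PySem.Int.floordiv (e - p) r).toNat = 0 := by omega
      rw [if_neg hc, h0']; simp

-- B's loop, started at start + m*r with enough fuel, appends the descending points start+m*r, …, start+r
lemma rtDown_eq (start r : Int) (hr : 0 < r) :
    ∀ (fuel : Nat) (m : Int) (acc : List Int), m.toNat < fuel →
      rtDown start r fuel (start + m * r) acc
        = acc ++ (List.range m.toNat).map (fun k : Nat => start + (m - k) * r) := by
  intro fuel
  induction fuel with
  | zero => intro m acc h; omega
  | succ fuel ih =>
    intro m acc h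
    rw [rtDown]
    by_cases hm : 0 < m
    · have hc : start < start + m * r := by nlinarith
      have harg : start + m * r - r = start + (m - 1) * r := by ring
      rw [if_pos hc, harg, ih (m - 1) _ (by omega)]
      have hk : m.toNat = (m - 1).toNat + 1 := by omega
      rw [hk, List.range_succ_eq_map, List.map_cons, List.map_map, List.append_assoc]
      refine congrArg (acc ++ ·) ?_
      refine List.cons_eq_cons.mpr ⟨by simp, ?_⟩
      apply List.map_congr_left; intro k _
      simp only [Function.comp]; push_cast; ring
    · have hc : ¬ start < start + m * r := by nlinarith
      have h0 : m.toNat = 0 := by omega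
      rw [if_neg hc, h0]; simp

-- reversing the descending progression gives the ascending one
lemma reverse_desc (start r : Int) (n : Nat) :
    ((List.range n).map (fun k : Nat => start + ((n : Int) - k) * r)).reverse
      = (List.range n).map (fun k : Nat => start + ((k : Int) + 1) * r) := by
  apply List.ext_getElem
  · simp
  · intro i h1 h2
    simp at h1 h2
    simp only [List.getElem_reverse, List.length_map, List.length_range,
      List.getElem_map, List.getElem_range]
    have : ((n : Int) - (n - 1 - i : Nat)) = (i : Int) + 1 := by omega
    rw [this]

-- ===== VERDICT (by name: the statement is the Claim_ definition above) =====
theorem roundto_range_spec : Claim_equal_roundto_range := by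
  intro s e r _ hr
  unfold Spec_roundto_range roundto_range roundto_range_alt
  rcases hr with hr' | ⟨hneg, hdone⟩
  case inr =>
    -- negative roundto, A's guard is false at once: both sides are [rounded start]
    simp only []
    set start := s - PySem.Int.mod s r with hstart
    set top := e - PySem.Int.mod e r with htop
    have hmb := PySem.Int.mod_neg_bounds (a := e) hneg
    have htoplt : top < start := by omega
    have hA : rtLoop e r ((e - start).toNat + 1) start = [] := by
      rw [rtLoop, if_neg (by omega)]
    have hB : rtDown start r ((top - start).toNat + 1) top [] = [] := by
      rw [rtDown, if_neg (by omega)]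
    rw [hA, hB]; simp
  simp only []
  set start := s - PySem.Int.mod s r with hstart
  set top := e - PySem.Int.mod e r with htop
  -- start and top are the floor-multiples of r below s and e
  have hqs := (PySem.Int.floordiv_eq_iff_of_pos (a := s) hr').mp rfl
  have hqe := (PySem.Int.floordiv_eq_iff_of_pos (a := e) hr').mp rfl
  have hms : start = PySem.Int.floordiv s r * r := by
    have h := PySem.Int.floordiv_mul_add_mod s r; rw [hstart]; linarith
  have hme : top = PySem.Int.floordiv e r * r := by
    have h := PySem.Int.floordiv_mul_add_mod e r; rw [htop]; linarith
  set m := PySem.Int.floordiv e r - PySem.Int.floordiv s r with hm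
  have htopm : top = start + m * r := by rw [hms, hme, hm]; ring
  have hn : PySem.Int.floordiv (e - start) r = m := by
    rw [PySem.Int.floordiv_eq_iff_of_pos hr']
    constructor <;> [nlinarith [hqe.1, hqe.2]; nlinarith [hqe.1, hqe.2]]
  have hfuelA : (e - start).toNat < (e - start).toNat + 1 := by omega
  rw [rtLoop_eq e r hr' _ start hfuelA, hn]
  rw [htopm, show start + m * r - start = m * r from by ring]
  have hfuelB : m.toNat < (m * r).toNat + 1 := by
    by_cases hle : m ≤ 0
    · omega
    · have hmr : m ≤ m * r := by nlinarith
      omega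
  rw [rtDown_eq start r hr' _ m [] hfuelB]
  rw [List.nil_append, List.reverse_append, List.reverse_singleton,
    List.singleton_append]
  refine List.cons_eq_cons.mpr ⟨rfl, ?_⟩
  by_cases hm0 : 0 ≤ m
  · have hcast : (m.toNat : Int) = m := Int.toNat_of_nonneg hm0
    rw [← reverse_desc start r m.toNat]
    congr 1
    apply List.map_congr_left; intro k _; rw [hcast]
  · have h0 : m.toNat = 0 := by omega
    rw [h0]; simp
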